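-- pv_equiv track=rewrite | github.com/minsangKang/CodingTest | Programmers/level1/Python/과일 장수.py | solution
-- ===== SOURCE A (Python) =====
-- def solution(k, m, score):
--     score = sorted(score, reverse=True)
--     result = 0
--     for i in range(0, len(score), m):
--         if i+m<=len(score):
--             box = score[i:i+m]
--             result += min(box)*m
--
--     return result
-- ===== SOURCE B (Python) =====
-- def solution(k, m, score):
--     if m <= 0:
--         return 0
--     counts = {}
--     for v in score:
--         counts[v] = counts.get(v, 0) + 1
--     n = len(score)
--     rem = n % m
--     total = 0
--     pos = 0
--     for v in sorted(counts):
--         hi = pos + counts[v]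
--         lo = pos if pos > rem else rem
--         if lo < hi:
--             total += v * m * ((hi - rem + m - 1) // m - (lo - rem + m - 1) // m)
--         pos = hi
--     return total
-- ===== Notes on version B (the rewrite author's own statement) =====
-- stated objective: alternative
-- what changed: B replaces A's sort-then-slice-and-min() scan with a counting approach: it builds a hash counter of the scores in one pass, then walks the distinct values in ascending order and computes each value's contribution to the box minima by closed-form ceiling-division arithmetic over its occurrence interval; A's raising m=0 (range step 0, ValueError) is excluded by Pre_.
import Mathlib
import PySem

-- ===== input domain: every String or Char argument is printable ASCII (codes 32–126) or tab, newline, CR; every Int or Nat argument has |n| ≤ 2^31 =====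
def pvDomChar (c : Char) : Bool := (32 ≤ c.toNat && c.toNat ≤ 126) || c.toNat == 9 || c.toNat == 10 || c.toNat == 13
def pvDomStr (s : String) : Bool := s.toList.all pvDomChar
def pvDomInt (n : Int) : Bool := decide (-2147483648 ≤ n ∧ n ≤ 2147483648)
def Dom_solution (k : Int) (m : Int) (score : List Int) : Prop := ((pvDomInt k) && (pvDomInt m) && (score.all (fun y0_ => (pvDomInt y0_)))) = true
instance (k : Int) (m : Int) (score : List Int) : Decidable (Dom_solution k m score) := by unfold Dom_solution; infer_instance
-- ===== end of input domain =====

-- B counts occurrences in a dict and walks the distinct values in ascending order, computing each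
-- value's contribution to the box minima by ceiling-division arithmetic over its occurrence
-- interval, instead of A's full sort plus a min() over every m-slice; equal return value proved.

-- ===== PORT A =====
-- literal port of A: sort descending, loop i in range(0, len, m), add min(score[i:i+m])*m for full boxes
def solution (k : Int) (m : Int) (score : List Int) : Int :=
  (PySem.List.pyRange 0 ((PySem.List.sorted score (fun x => x) true).length : Int) m).foldl
    (fun result i =>
      if i + m ≤ ((PySem.List.sorted score (fun x => x) true).length : Int) then
        result +
          (PySem.List.min?
              (PySem.List.slice (PySem.List.sorted score (fun x => x) true) (some i) (some (i + m)))
              (fun x => x)).getD 0 * m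
      else result) 0

-- ===== PORT B =====
-- literal port of B: build counts{} over score, then for v in sorted(counts) keep (total, pos):
-- hi = pos + counts[v]; lo = max(pos, rem); if lo < hi add v*m*((hi-rem+m-1)//m - (lo-rem+m-1)//m)
def solution_alt (k : Int) (m : Int) (score : List Int) : Int :=
  if m ≤ 0 then 0
  else
    let counts := score.foldl (fun d v => d.insert v (d.getD v 0 + 1)) (PySem.Dict.empty : PySem.Dict Int Int)
    let n : Int := (score.length : Int)
    let rem : Int := PySem.Int.mod n m
    ((PySem.List.sorted counts.keys (fun x => x) false).foldl
      (fun (st : Int × Int) v =>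
        (if (if st.2 > rem then st.2 else rem) < st.2 + counts.getD v 0 then
           st.1 + v * m *
             (PySem.Int.floordiv (st.2 + counts.getD v 0 - rem + m - 1) m -
              PySem.Int.floordiv ((if st.2 > rem then st.2 else rem) - rem + m - 1) m)
         else st.1, st.2 + counts.getD v 0)) ((0 : Int), (0 : Int))).1

-- ===== PRECONDITION & SPEC =====
-- Pre_ excludes only m = 0, where Python's range(0, len, 0) raises ValueError in A.
def Pre_solution (k : Int) (m : Int) (score : List Int) : Prop := m ≠ 0
instance (k : Int) (m : Int) (score : List Int) : Decidable (Pre_solution k m score) := by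
  unfold Pre_solution; infer_instance

def pvWitness_solution : Int × Int × List Int := (4, 2, [1, 2, 3, 4])

def Spec_solution (k : Int) (m : Int) (score : List Int) (out : Int) : Prop := out = solution_alt k m score
instance (k : Int) (m : Int) (score : List Int) (out : Int) : Decidable (Spec_solution k m score out) := by unfold Spec_solution; infer_instance

-- ===== CLAIM (what is proved, stated in full; the proofs are below) =====
def Claim_equal_solution : Prop := ∀ (k : Int) (m : Int) (score : List Int), Dom_solution k m score → Pre_solution k m score → Spec_solution k m score (solution k m score)

-- ===== LEMMAS AND PROOFS =====

-- number of box-min indices rN + j*M that fall strictly below x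
def pvCnt (M rN x : Nat) : Nat := if rN ≤ x then (x - rN + M - 1) / M else 0

-- sum of the sorted list's values at box-min indices rN + j*M lying in [p, q)
def pvG (a : List Int) (M rN bN p q : Nat) : Int :=
  ∑ j ∈ (Finset.range bN).filter (fun j => p ≤ rN + j * M ∧ rN + j * M < q),
    a.getD (rN + j * M) 0

lemma pv_cnt_bracket (M rN x j : Nat) (hM : 0 < M) :
    rN + j * M < x ↔ j < pvCnt M rN x := by
  unfold pvCnt
  split_ifs with h
  · rw [Nat.lt_iff_add_one_le (m := j), Nat.le_div_iff_mul_le hM, add_one_mul]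
    generalize j * M = P
    omega
  · generalize j * M = P
    omega

lemma pv_cnt_mono (M rN x y : Nat) (h : x ≤ y) : pvCnt M rN x ≤ pvCnt M rN y := by
  unfold pvCnt
  split_ifs with h1 h2
  · exact Nat.div_le_div_right (by omega)
  · omega
  · exact Nat.zero_le _
  · exact Nat.zero_le _

lemma pv_cnt_le_bN (M rN bN x : Nat) (hM : 0 < M) (hx : x ≤ M * bN + rN) :
    pvCnt M rN x ≤ bN := by
  unfold pvCnt
  split_ifs with h
  · have : (x - rN + M - 1) / M < bN + 1 := by
      rw [Nat.div_lt_iff_lt_mul hM, add_one_mul]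
      have := Nat.mul_comm bN M
      generalize hq : M * bN = Q at *
      omega
    omega
  · exact Nat.zero_le _

lemma pv_G_empty (a : List Int) (M rN bN p : Nat) : pvG a M rN bN p p = 0 := by
  unfold pvG
  rw [Finset.filter_false_of_mem (fun j _ => by omega), Finset.sum_empty]

lemma pv_G_run (a : List Int) (v : Int) (M rN bN p c : Nat) (hM : 0 < M) (hc : 0 < c)
    (hval : ∀ i, p ≤ i → i < p + c → a.getD i 0 = v)
    (hle : pvCnt M rN (p + c) ≤ bN) :
    pvG a M rN bN p (p + c) = ((pvCnt M rN (p + c) - pvCnt M rN p : Nat) : Int) * v := by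
  unfold pvG
  have hset : (Finset.range bN).filter (fun j => p ≤ rN + j * M ∧ rN + j * M < p + c)
      = Finset.Ico (pvCnt M rN p) (pvCnt M rN (p + c)) := by
    ext j
    simp only [Finset.mem_filter, Finset.mem_range, Finset.mem_Ico]
    have hb1 := pv_cnt_bracket M rN p j hM
    have hb2 := pv_cnt_bracket M rN (p + c) j hM
    generalize rN + j * M = idx at hb1 hb2 ⊢
    omega
  have hconst : ∀ j ∈ Finset.Ico (pvCnt M rN p) (pvCnt M rN (p + c)),
      a.getD (rN + j * M) 0 = v := by
    intro j hj
    rw [Finset.mem_Ico] at hj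
    have hb1 := pv_cnt_bracket M rN p j hM
    have hb2 := pv_cnt_bracket M rN (p + c) j hM
    exact hval (rN + j * M) (by omega) (by omega)
  rw [hset]
  calc (∑ j ∈ Finset.Ico (pvCnt M rN p) (pvCnt M rN (p + c)), a.getD (rN + j * M) 0)
      = ∑ _j ∈ Finset.Ico (pvCnt M rN p) (pvCnt M rN (p + c)), v := Finset.sum_congr rfl hconst
    _ = ((pvCnt M rN (p + c) - pvCnt M rN p : Nat) : Int) * v := by
        rw [Finset.sum_const, Nat.card_Ico, nsmul_eq_mul]

lemma pv_G_split (a : List Int) (M rN bN p q r : Nat) (hpq : p ≤ q) (hqr : q ≤ r) :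
    pvG a M rN bN p r = pvG a M rN bN p q + pvG a M rN bN q r := by
  unfold pvG
  rw [← Finset.sum_filter_add_sum_filter_not
    ((Finset.range bN).filter (fun j => p ≤ rN + j * M ∧ rN + j * M < r))
    (fun j => rN + j * M < q), Finset.filter_filter, Finset.filter_filter]
  congr 1
  · apply Finset.sum_congr _ (fun _ _ => rfl)
    ext j
    simp only [Finset.mem_filter, Finset.mem_range]
    generalize rN + j * M = idx
    omega
  · apply Finset.sum_congr _ (fun _ _ => rfl)
    ext j
    simp only [Finset.mem_filter, Finset.mem_range, not_lt]
    generalize rN + j * M = idx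
    omega

lemma pv_G_full (a : List Int) (M rN bN : Nat) (hM : 0 < M) :
    pvG a M rN bN 0 (M * bN + rN) = ∑ j ∈ Finset.range bN, a.getD (rN + j * M) 0 := by
  unfold pvG
  rw [Finset.filter_true_of_mem]
  intro j hj
  rw [Finset.mem_range] at hj
  refine ⟨Nat.zero_le _, ?_⟩
  have h1 : (j + 1) * M ≤ bN * M := Nat.mul_le_mul_right M (by omega)
  rw [add_one_mul] at h1
  have h2 : bN * M = M * bN := Nat.mul_comm bN M
  generalize j * M = P at *
  omega

-- count of each value in the run decomposition
lemma pv_count_flatMap (c : Int → Nat) (y : Int) :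
    ∀ ks : List Int, ks.Nodup →
      (ks.flatMap (fun v => List.replicate (c v) v)).count y = if y ∈ ks then c y else 0 := by
  intro ks
  induction ks with
  | nil => intro _; simp
  | cons v t ih =>
    intro hnd
    rw [List.flatMap_cons, List.count_append, List.count_replicate,
      ih (List.nodup_cons.mp hnd).2]
    by_cases hyv : y = v
    · subst hyv
      have : y ∉ t := (List.nodup_cons.mp hnd).1
      simp [this]
    · simp [hyv, Ne.symm hyv]

lemma pv_pairwise_flatMap (c : Int → Nat) :
    ∀ ks : List Int, ks.Pairwise (· < ·) →
      (ks.flatMap (fun v => List.replicate (c v) v)).Pairwise (fun a b : Int => a ≤ b) := by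
  intro ks
  induction ks with
  | nil => intro _; simp
  | cons v t ih =>
    intro hp
    rw [List.flatMap_cons, List.pairwise_append]
    refine ⟨List.pairwise_replicate.mpr (Or.inr le_rfl), ih (List.pairwise_cons.mp hp).2, ?_⟩
    intro x hx y hy
    have hxv : x = v := (List.mem_replicate.mp hx).2
    obtain ⟨w, hw, hyw⟩ := List.mem_flatMap.mp hy
    have hyw' : y = w := (List.mem_replicate.mp hyw).2
    have : v < w := (List.pairwise_cons.mp hp).1 w hw
    omega

-- sorted(score) is the concatenation of the runs of the ascending distinct values
lemma pv_sorted_eq_flatMap (score : List Int) :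
    PySem.List.sorted score (fun x => x) false
      = (PySem.List.sorted (PySem.Set.ofList score) (fun x => x) false).flatMap
          (fun v => List.replicate (score.count v) v) := by
  have hnd : (PySem.List.sorted (PySem.Set.ofList score) (fun x => x) false).Nodup :=
    (PySem.List.sorted_perm _ _ _).symm.nodup (PySem.Set.nodup_ofList score)
  apply PySem.List.sorted_id_eq_of_perm_of_pairwise
  · apply List.perm_iff_count.mpr
    intro y
    rw [pv_count_flatMap _ y _ hnd]
    by_cases hy : y ∈ score
    · rw [if_pos (by rw [PySem.List.mem_sorted]; exact (PySem.Set.mem_ofList _ _).mpr hy)]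
    · rw [if_neg (by rw [PySem.List.mem_sorted, PySem.Set.mem_ofList]; exact hy),
        List.count_eq_zero_of_not_mem hy]
  · exact pv_pairwise_flatMap _ _ (PySem.List.sorted_ofList_pairwise_lt score)

lemma pv_floordiv_cnt (m : Int) (M rN : Nat) (hM : (M : Int) = m) (hM0 : 0 < M)
    (x : Nat) (hx : rN ≤ x) :
    PySem.Int.floordiv ((x : Int) - (rN : Int) + m - 1) m = (pvCnt M rN x : Int) := by
  rw [← hM]
  have he : ((x : Int) - (rN : Int) + (M : Int) - 1) = ((x - rN + M - 1 : Nat) : Int) := by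
    push_cast; omega
  rw [he, PySem.Int.floordiv_natCast]
  unfold pvCnt
  rw [if_pos hx]

-- the central fold invariant for B's loop over the runs
lemma pv_fold_runs (m : Int) (M rN bN : Nat) (hM : (M : Int) = m) (hM0 : 0 < M)
    (a : List Int) (haN : a.length = M * bN + rN) (cfn : Int → Nat) :
    ∀ (ks : List Int) (pre : List Int) (t : Int),
      (∀ v ∈ ks, 0 < cfn v) →
      a = pre ++ ks.flatMap (fun v => List.replicate (cfn v) v) →
      ks.foldl (fun (st : Int × Int) v =>
          (if (if st.2 > (rN : Int) then st.2 else (rN : Int)) < st.2 + (cfn v : Int) then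
             st.1 + v * m *
               (PySem.Int.floordiv (st.2 + (cfn v : Int) - (rN : Int) + m - 1) m -
                PySem.Int.floordiv ((if st.2 > (rN : Int) then st.2 else (rN : Int)) - (rN : Int) + m - 1) m)
           else st.1, st.2 + (cfn v : Int))) (t, (pre.length : Int))
        = (t + m * pvG a M rN bN pre.length a.length, (a.length : Int)) := by
  intro ks
  induction ks with
  | nil =>
    intro pre t _ ha
    have hl : a.length = pre.length := by rw [ha]; simp
    rw [List.foldl_nil, hl, pv_G_empty]
    simp
  | cons v ks ih =>
    intro pre t hpos ha
    rw [List.flatMap_cons, ← List.append_assoc] at ha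
    set c := cfn v with hcdef
    have hc : 0 < c := hpos v (by simp)
    set p := pre.length with hpdef
    have hplen : (pre ++ List.replicate c v).length = p + c := by
      simp [hpdef]
    have hqN : p + c ≤ a.length := by
      rw [ha, List.length_append, hplen]
      omega
    have hcntle : pvCnt M rN (p + c) ≤ bN :=
      pv_cnt_le_bN M rN bN (p + c) hM0 (by omega)
    have hmono : pvCnt M rN p ≤ pvCnt M rN (p + c) := pv_cnt_mono M rN p (p + c) (by omega)
    have hval : ∀ i, p ≤ i → i < p + c → a.getD i 0 = v := by
      intro i h1 h2
      rw [ha, List.getD_append _ _ _ _ (by omega),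
        List.getD_append_right _ _ _ _ (by omega)]
      simp [List.getD_eq_getElem?_getD, (by omega : i - pre.length < c)]
    have hrun := pv_G_run a v M rN bN p c hM0 hc hval hcntle
    have hstep :
        (if (if (p : Int) > (rN : Int) then (p : Int) else (rN : Int)) < (p : Int) + (c : Int) then
           t + v * m *
             (PySem.Int.floordiv ((p : Int) + (c : Int) - (rN : Int) + m - 1) m -
              PySem.Int.floordiv ((if (p : Int) > (rN : Int) then (p : Int) else (rN : Int)) - (rN : Int) + m - 1) m)
         else t)
          = t + m * pvG a M rN bN p (p + c) := by
      rw [hrun]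
      have e1 : (p : Int) + (c : Int) = ((p + c : Nat) : Int) := by push_cast; ring
      by_cases hpr : (p : Int) > (rN : Int)
      · have hrp : rN ≤ p := by omega
        rw [if_pos hpr]
        rw [if_pos (by omega : (p : Int) < (p : Int) + (c : Int))]
        rw [e1, pv_floordiv_cnt m M rN hM hM0 (p + c) (by omega),
          pv_floordiv_cnt m M rN hM hM0 p hrp, ← Nat.cast_sub hmono]
        ring
      · have hpr' : p ≤ rN := by omega
        have hcp0 : pvCnt M rN p = 0 := by
          unfold pvCnt
          split_ifs with h
          · exact Nat.div_eq_of_lt (by omega)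
          · rfl
        rw [if_neg hpr]
        by_cases hg : (rN : Int) < (p : Int) + (c : Int)
        · have hgN : rN < p + c := by omega
          have hc0 : pvCnt M rN rN = 0 := by
            unfold pvCnt
            rw [if_pos le_rfl]
            exact Nat.div_eq_of_lt (by omega)
          rw [if_pos hg, e1, pv_floordiv_cnt m M rN hM hM0 (p + c) (by omega),
            pv_floordiv_cnt m M rN hM hM0 rN le_rfl, hc0, hcp0, Nat.sub_zero]
          push_cast
          ring
        · have hgN : p + c ≤ rN := by omega
          have hcq0 : pvCnt M rN (p + c) = 0 := by
            unfold pvCnt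
            split_ifs with h
            · exact Nat.div_eq_of_lt (by omega)
            · rfl
          rw [if_neg hg, hcq0, hcp0]
          simp
    have ihres := ih (pre ++ List.replicate c v) (t + m * pvG a M rN bN p (p + c))
      (fun w hw => hpos w (by simp [hw])) ha
    rw [hplen] at ihres
    rw [List.foldl_cons]
    dsimp only
    rw [hstep, show ((p : Int) + (c : Int)) = ((p + c : Nat) : Int) by push_cast; ring, ihres,
      pv_G_split a M rN bN p (p + c) a.length (by omega) hqN]
    congr 1
    ring

-- ===== A-side lemmas (characterising A's per-box min as an index into the ascending sort) =====

lemma pv_sum_map_range (g : Nat → Int) : ∀ n : Nat, ((List.range n).map g).sum = ∑ j ∈ Finset.range n, g j := by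
  intro n
  induction n with
  | zero => simp
  | succ n ih =>
    rw [List.range_succ, List.map_append, List.sum_append, Finset.sum_range_succ, ih]
    simp

lemma pv_foldl_ite_add (n m : Int) (f : Int → Int) :
    ∀ (l : List Int) (init : Int),
      l.foldl (fun r i => if i + m ≤ n then r + f i else r) init
        = init + (l.map (fun i => if i + m ≤ n then f i else 0)).sum := by
  intro l
  induction l with
  | nil => intro init; simp
  | cons x t ih =>
    intro init
    simp only [List.foldl_cons, List.map_cons, List.sum_cons]
    by_cases h : x + m ≤ n
    · rw [if_pos h, if_pos h, ih]; ring
    · rw [if_neg h, if_neg h, ih]; ring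

lemma pv_foldl_min_desc :
    ∀ (t : List Int) (x : Int), (x :: t).Pairwise (fun a b => b ≤ a) →
      some (t.foldl min x) = (x :: t).getLast? := by
  intro t
  induction t with
  | nil => intro x _; simp
  | cons y ys ih =>
    intro x h
    have hxy : y ≤ x := (List.pairwise_cons.mp h).1 y (by simp)
    have h' : (y :: ys).Pairwise (fun a b : Int => b ≤ a) := (List.pairwise_cons.mp h).2
    rw [List.foldl_cons, min_eq_right hxy, List.getLast?_cons_cons]
    exact ih y h'

lemma pv_min?_desc (l : List Int) (h : l.Pairwise (fun a b => b ≤ a)) :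
    PySem.List.min? l (fun x => x) = l.getLast? := by
  cases l with
  | nil => exact (PySem.List.min?_eq_none_iff _ _).mpr rfl
  | cons x t => rw [PySem.List.min?_id_cons, pv_foldl_min_desc t x h]

lemma pv_min_box (l : List Int) (hl : l.Pairwise (fun x y => y ≤ x)) (iN M : Nat)
    (hM : 1 ≤ M) (hle : iN + M ≤ l.length) :
    (PySem.List.min? ((l.drop iN).take M) (fun x => x)).getD 0 = (l[iN + (M - 1)]?).getD 0 := by
  have hsub : ((l.drop iN).take M).Pairwise (fun x y : Int => y ≤ x) :=
    List.Pairwise.sublist ((List.take_sublist _ _).trans (List.drop_sublist _ _)) hl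
  rw [pv_min?_desc _ hsub, List.getLast?_eq_getElem?]
  have hlen : ((l.drop iN).take M).length = M := by
    simp only [List.length_take, List.length_drop]
    omega
  rw [hlen, List.getElem?_take, if_pos (by omega : M - 1 < M), List.getElem?_drop]

lemma pv_sorted_rev_eq_reverse (xs : List Int) :
    PySem.List.sorted xs (fun x => x) true = (PySem.List.sorted xs (fun x => x) false).reverse := by
  apply List.Perm.eq_of_pairwise (le := fun a b : Int => b ≤ a)
  · intro a b _ _ h1 h2; omega
  · exact PySem.List.sorted_pairwise_rev xs _
  · exact List.pairwise_reverse.mpr (PySem.List.sorted_pairwise xs _)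
  · exact ((PySem.List.sorted_perm xs _ true).trans
      (PySem.List.sorted_perm xs _ false).symm).trans (List.reverse_perm _).symm

lemma pv_pyRange_neg_empty (n m : Int) (hn : 0 ≤ n) (hm : m < 0) :
    PySem.List.pyRange 0 n m = [] := by
  simp only [PySem.List.pyRange]
  rw [if_neg (show ¬ m = 0 by omega), if_neg (show ¬ 0 < m by omega),
    if_neg (show ¬ n < 0 by omega)]
  simp

-- A equals the sum of sorted(score)[rN + j*M] * m over the bN full boxes
lemma pv_A_eq_S (k m : Int) (score : List Int) (hm1 : 0 < m) :
    solution k m score =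
      ∑ j ∈ Finset.range ((PySem.List.sorted score (fun x => x) false).length / m.toNat),
        (PySem.List.sorted score (fun x => x) false).getD
          ((PySem.List.sorted score (fun x => x) false).length % m.toNat + j * m.toNat) 0 * m := by
  simp only [solution]
  rw [pv_sorted_rev_eq_reverse score]
  simp only [List.length_reverse]
  set a := PySem.List.sorted score (fun x => x) false with ha
  set n : Int := (a.length : Int) with hn
  have hn0 : 0 ≤ n := Int.natCast_nonneg _
  set M := m.toNat with hMdef
  have hMm : (M : Int) = m := Int.toNat_of_nonneg (by omega)
  have hM1 : 1 ≤ M := by omega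
  set rN := a.length % M with hrNdef
  set bN := a.length / M with hbNdef
  have hNat : a.length = M * bN + rN := (Nat.div_add_mod a.length M).symm
  have hbN : (bN : Int) = n / m := by rw [hbNdef, hn, ← hMm, Int.natCast_ediv]
  have hrN : (rN : Int) = n % m := by rw [hrNdef, hn, ← hMm, Int.natCast_emod]
  have hbr : m * (n / m) + n % m = n := Int.ediv_add_emod n m
  have hr0 : 0 ≤ n % m := Int.emod_nonneg n (by omega)
  have hrm : n % m < m := Int.emod_lt_of_pos n hm1
  have hb0 : 0 ≤ n / m := Int.ediv_nonneg hn0 (by omega)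
  have hcond : ∀ x : Nat, (m * (x : Int) + m ≤ n) ↔ x < bN := by
    intro x
    constructor
    · intro h
      have he : ((x : Int) + 1) * m = m * (x : Int) + m := by ring
      have h1 : ((x : Int) + 1) * m ≤ n := by linarith
      have h2 : (x : Int) + 1 ≤ n / m := (Int.le_ediv_iff_mul_le hm1).mpr h1
      omega
    · intro h
      have h2 : (x : Int) + 1 ≤ n / m := by omega
      have h1 := (Int.le_ediv_iff_mul_le hm1).mp h2
      have he : ((x : Int) + 1) * m = m * (x : Int) + m := by ring
      linarith
  rw [PySem.List.pyRange_of_pos 0 n hm1]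
  rw [pv_foldl_ite_add n m
      (fun i => (PySem.List.min? (PySem.List.slice a.reverse (some i) (some (i + m))) (fun x => x)).getD 0 * m)]
  simp only [List.map_map, zero_add]
  rw [pv_sum_map_range]
  simp only [Function.comp_apply]
  have hbcnt : bN ≤ (if (0 : Int) < n then ((n - 0 + m - 1) / m).toNat else 0) := by
    by_cases hbz : bN = 0
    · simp [hbz]
    · have hb1 : (1 : Int) ≤ n / m := by omega
      have hmb : m * 1 ≤ m * (n / m) := mul_le_mul_of_nonneg_left hb1 (by omega)
      have hnpos : (0 : Int) < n := by linarith
      rw [if_pos hnpos]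
      have h2 : (bN : Int) ≤ (n - 0 + m - 1) / m := by
        rw [Int.le_ediv_iff_mul_le hm1, hbN]
        have hc : (n / m) * m = m * (n / m) := mul_comm _ _
        linarith
      have h3 := Int.toNat_le_toNat h2
      simpa using h3
  have hsub : Finset.range bN ⊆
      Finset.range (if (0 : Int) < n then ((n - 0 + m - 1) / m).toNat else 0) := by
    intro x hx
    simp only [Finset.mem_range] at *
    omega
  rw [← Finset.sum_subset hsub (by
    intro x _ hnx
    have hxb : ¬ x < bN := by simpa [Finset.mem_range] using hnx
    rw [if_neg (fun hc => hxb ((hcond x).mp hc))])]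
  conv_rhs => rw [← Finset.sum_range_reflect]
  apply Finset.sum_congr rfl
  intro q hq
  have hk' : q < bN := Finset.mem_range.mp hq
  rw [if_pos ((hcond q).mpr hk')]
  have e1 : m * (q : Int) = ((M * q : Nat) : Int) := by push_cast [hMm]; ring
  have e2 : m * (q : Int) + m = ((M * q + M : Nat) : Int) := by push_cast [hMm]; ring
  rw [e2, e1, PySem.List.slice_natCast, Nat.add_sub_cancel_left]
  have hrev : a.reverse.Pairwise (fun x y : Int => y ≤ x) :=
    List.pairwise_reverse.mpr (PySem.List.sorted_pairwise score (fun x => x))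
  have hle : M * q + M ≤ a.reverse.length := by
    rw [List.length_reverse, hNat]
    have h1 : M * (q + 1) ≤ M * bN := Nat.mul_le_mul_left M (by omega)
    calc M * q + M = M * (q + 1) := by ring
      _ ≤ M * bN := h1
      _ ≤ M * bN + rN := Nat.le_add_right _ _
  rw [pv_min_box a.reverse hrev (M * q) M hM1 hle]
  have hle' : M * q + M ≤ a.length := by simpa using hle
  have hlt : M * q + (M - 1) < a.reverse.length := by
    rw [List.length_reverse]
    generalize M * q = P at hle' ⊢
    omega
  rw [List.getElem?_reverse (by rw [List.length_reverse] at hlt; exact hlt)]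
  have hsplit : M * q + M + (bN - 1 - q) * M = M * bN := by
    have h1 : q + 1 + (bN - 1 - q) = bN := by omega
    calc M * q + M + (bN - 1 - q) * M = (q + 1 + (bN - 1 - q)) * M := by ring
      _ = bN * M := by rw [h1]
      _ = M * bN := Nat.mul_comm _ _
  have hidx : a.length - 1 - (M * q + (M - 1)) = rN + (bN - 1 - q) * M := by
    have h2 := hNat
    generalize M * q = P at hsplit ⊢
    generalize (bN - 1 - q) * M = Q at hsplit ⊢
    generalize M * bN = R at hsplit h2
    omega
  rw [hidx, List.getD_eq_getElem?_getD]

-- B equals the same sum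
lemma pv_B_eq_S (k m : Int) (score : List Int) (hm1 : 0 < m) :
    solution_alt k m score =
      ∑ j ∈ Finset.range ((PySem.List.sorted score (fun x => x) false).length / m.toNat),
        (PySem.List.sorted score (fun x => x) false).getD
          ((PySem.List.sorted score (fun x => x) false).length % m.toNat + j * m.toNat) 0 * m := by
  simp only [solution_alt]
  rw [if_neg (by omega : ¬ m ≤ 0)]
  rw [PySem.Dict.foldl_insert_getD_add_one_eq_counter]
  simp only [PySem.Dict.keys_counter, PySem.Dict.getD_counter]
  set a := PySem.List.sorted score (fun x => x) false with hadef
  set M := m.toNat with hMdef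
  have hMm : (M : Int) = m := Int.toNat_of_nonneg (by omega)
  have hM0 : 0 < M := by omega
  set rN := a.length % M with hrNdef
  set bN := a.length / M with hbNdef
  have hlen : a.length = score.length := PySem.List.length_sorted score _ false
  have hmod : PySem.Int.mod ((score.length : Nat) : Int) m = ((rN : Nat) : Int) := by
    rw [PySem.Int.mod_eq_emod_of_pos hm1, hrNdef, hlen, ← hMm, Int.natCast_emod]
  rw [hmod]
  have haN : a.length = M * bN + rN := (Nat.div_add_mod a.length M).symm
  have hfold := pv_fold_runs m M rN bN hMm hM0 a haN (fun w => score.count w)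
    (PySem.List.sorted (PySem.Set.ofList score) (fun x => x) false) [] 0
    (fun w hw => List.count_pos_iff.mpr (by
      rw [PySem.List.mem_sorted] at hw
      exact (PySem.Set.mem_ofList _ _).mp hw))
    (by rw [List.nil_append]; exact pv_sorted_eq_flatMap score)
  simp only [List.length_nil, Nat.cast_zero] at hfold
  rw [hfold]
  dsimp only
  rw [haN, pv_G_full a M rN bN hM0, Finset.mul_sum, zero_add]
  exact Finset.sum_congr rfl (fun j _ => mul_comm _ _)

-- ===== VERDICT (by name: the statement is the Claim_ definition above) =====
theorem solution_spec : Claim_equal_solution := by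
  unfold Claim_equal_solution Spec_solution Pre_solution
  intro k m score _ hm
  by_cases hmp : m ≤ 0
  · -- m < 0 : A's range is empty, B returns 0
    have hmneg : m < 0 := lt_of_le_of_ne hmp hm
    rw [show solution_alt k m score = 0 by rw [solution_alt, if_pos hmp]]
    simp only [solution]
    rw [pv_pyRange_neg_empty _ _ (Int.natCast_nonneg _) hmneg]
    rfl
  · have hm1 : 0 < m := by omega
    rw [pv_A_eq_S k m score hm1, pv_B_eq_S k m score hm1]
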